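-- pv_equiv track=rewrite | github.com/rin2401/r3jam | hackercup/2021/1/weak_typing_chapter_1.py | solve
-- ===== SOURCE A (Python) =====
-- def solve(text):
--     hand = None
--     count = 0
--     for s in text:
--         if s != "F" and hand != s:
--             hand = s
--             count += 1
--
--     if count > 0:
--         count -= 1
--
--     return count
-- ===== SOURCE B (Python) =====
-- def solve(text):
--     filtered = [c for c in text if c != "F"]
--     return sum(a != b for a, b in zip(filtered, filtered[1:]))
-- ===== Notes on version B (the rewrite author's own statement) =====
-- stated objective: simpler
-- what changed: B filters the filler characters out into a list and counts adjacent unequal pairs with zip, replacing A's stateful hand/count pass and its final decrement guard.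
import Mathlib
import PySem

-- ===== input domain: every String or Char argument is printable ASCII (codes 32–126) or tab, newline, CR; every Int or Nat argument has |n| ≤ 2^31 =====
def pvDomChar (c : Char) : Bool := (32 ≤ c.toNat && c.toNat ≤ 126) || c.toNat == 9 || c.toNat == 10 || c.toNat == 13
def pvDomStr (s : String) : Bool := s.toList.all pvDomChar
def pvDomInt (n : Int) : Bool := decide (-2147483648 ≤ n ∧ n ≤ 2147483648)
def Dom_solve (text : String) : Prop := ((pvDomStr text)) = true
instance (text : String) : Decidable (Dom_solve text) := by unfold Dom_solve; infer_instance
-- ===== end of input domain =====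

-- B filters the non-'F' characters and counts adjacent unequal pairs; A keeps a hand/count state and decrements once.

-- ===== PORT A =====
-- state: (hand, count), literal transliteration of A's loop
def solveStep (st : Option Char × Int) (s : Char) : Option Char × Int :=
  if s ≠ 'F' ∧ st.1 ≠ some s then (some s, st.2 + 1) else st

def solve (text : String) : Int :=
  let st := text.toList.foldl solveStep (none, 0)
  let count := st.2
  if count > 0 then count - 1 else count

-- ===== PORT B =====
def solve_alt (text : String) : Int :=
  let filtered := text.toList.filter (fun c => c ≠ 'F')
  (filtered.zip filtered.tail).foldl (fun acc p => acc + (if p.1 ≠ p.2 then 1 else 0)) 0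

-- ===== PRECONDITION & SPEC =====
def Spec_solve (text : String) (out : Int) : Prop := out = solve_alt text
instance (text : String) (out : Int) : Decidable (Spec_solve text out) := by unfold Spec_solve; infer_instance

-- ===== CLAIM (what is proved, stated in full; the proofs are below) =====
def Claim_equal_solve : Prop := ∀ (text : String), Dom_solve text → Spec_solve text (solve text)

-- ===== LEMMAS AND PROOFS =====

-- transition count of a list (number of adjacent unequal pairs)
def pc : List Char → Int
  | a :: b :: t => (if a ≠ b then 1 else 0) + pc (b :: t)
  | _ => 0

theorem pc_nonneg : ∀ l : List Char, 0 ≤ pc l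
  | [] => le_refl 0
  | [_] => le_refl 0
  | a :: b :: t => by
    have := pc_nonneg (b :: t)
    simp only [pc]; split <;> omega

-- A's fold ignores 'F' characters
theorem foldA_filter (l : List Char) : ∀ st : Option Char × Int,
    l.foldl solveStep st = (l.filter (fun c => c ≠ 'F')).foldl solveStep st := by
  induction l with
  | nil => intro st; rfl
  | cons a t ih =>
    intro st
    by_cases hF : a = 'F'
    · subst hF
      simp only [List.foldl_cons, List.filter_cons]
      have : solveStep st 'F' = st := by simp [solveStep]
      simp [this, ih]
    · simp only [List.foldl_cons, List.filter_cons]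
      simp [hF, ih]

-- on an 'F'-free list starting from (some c, k), the fold's count is k + pc (c :: l)
theorem foldA_pc (l : List Char) : ∀ (c : Char) (k : Int), (∀ x ∈ l, x ≠ 'F') →
    (l.foldl solveStep (some c, k)).2 = k + pc (c :: l) := by
  induction l with
  | nil => intro c k _; simp [pc]
  | cons b t ih =>
    intro c k h
    have hb : b ≠ 'F' := h b (by simp)
    have ht : ∀ x ∈ t, x ≠ 'F' := fun x hx => h x (by simp [hx])
    by_cases hcb : c = b
    · subst hcb
      simp only [List.foldl_cons, solveStep, hb]
      simp [ih c k ht, pc]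
    · simp only [List.foldl_cons, solveStep]
      have : (b ≠ 'F' ∧ (some c : Option Char) ≠ some b) := ⟨hb, by simp [hcb]⟩
      rw [if_pos this]
      simp only [ih b (k+1) ht, pc]
      simp [hcb]; ring

-- B's zip fold computes acc + pc l
theorem foldB_pc : ∀ (l : List Char) (acc : Int),
    (l.zip l.tail).foldl (fun acc p => acc + (if p.1 ≠ p.2 then 1 else 0)) acc = acc + pc l
  | [], acc => by simp [pc]
  | [a], acc => by simp [pc]
  | a :: b :: t, acc => by
    simp only [List.zip, List.tail, List.zipWith, List.foldl_cons]
    have := foldB_pc (b :: t) (acc + if a ≠ b then 1 else 0)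
    simp only [List.zip, List.tail] at this
    rw [this]; simp only [pc]; ring

-- ===== VERDICT (by name: the statement is the Claim_ definition above) =====
theorem solve_spec : Claim_equal_solve := by
  intro text _
  unfold Spec_solve solve solve_alt
  rw [foldA_filter, foldB_pc]
  have hnoF : ∀ x ∈ text.toList.filter (fun c => c ≠ 'F'), x ≠ 'F' := by
    intro x hx
    have := List.of_mem_filter hx
    simpa using this
  cases h : text.toList.filter (fun c => c ≠ 'F') with
  | nil => simp [pc]
  | cons c t =>
    rw [h] at hnoF
    have hc : c ≠ 'F' := hnoF c (by simp)
    have ht : ∀ x ∈ t, x ≠ 'F' := fun x hx => hnoF x (by simp [hx])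
    simp only [List.foldl_cons, solveStep]
    rw [if_pos (show c ≠ 'F' ∧ ((none : Option Char), (0:Int)).1 ≠ some c from ⟨hc, by simp⟩)]
    rw [foldA_pc t c (0 + 1) ht]
    have := pc_nonneg (c :: t)
    split <;> omega
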